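-- pv_equiv track=rewrite | github.com/JasmineGonzalez10/anticipation | anticipation/tokenize.py | arrival_to_interarrival
-- ===== SOURCE A (Python) =====
-- def arrival_to_interarrival(control_tokens):
--     time_tokens = control_tokens[0::3]
--     if len(time_tokens) >= 2:
--         firsts = time_tokens[1:]
--         lasts = time_tokens[:-1]
--         diffs = []
--         for i in range(len(time_tokens) - 1):
--             diffs.append(firsts[i] - lasts[i])
--         time_tokens[1:] = diffs
--     control_tokens[0::3] = time_tokens
--     return control_tokens
-- ===== SOURCE B (Python) =====
-- def arrival_to_interarrival(control_tokens):
--     n = len(control_tokens)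
--     if n > 3:
--         i = 3 * ((n - 1) // 3)  # last in-bounds index that is a multiple of 3
--         while i >= 3:
--             control_tokens[i] -= control_tokens[i - 3]
--             i -= 3
--     return control_tokens
-- ===== Notes on version B (the rewrite author's own statement) =====
-- stated objective: simpler
-- what changed: Replaces the slice-extract / forward diffs list / scatter-back pipeline by a single reverse in-place index loop that subtracts each time token's original predecessor, allocating no intermediate lists.
import Mathlib
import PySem

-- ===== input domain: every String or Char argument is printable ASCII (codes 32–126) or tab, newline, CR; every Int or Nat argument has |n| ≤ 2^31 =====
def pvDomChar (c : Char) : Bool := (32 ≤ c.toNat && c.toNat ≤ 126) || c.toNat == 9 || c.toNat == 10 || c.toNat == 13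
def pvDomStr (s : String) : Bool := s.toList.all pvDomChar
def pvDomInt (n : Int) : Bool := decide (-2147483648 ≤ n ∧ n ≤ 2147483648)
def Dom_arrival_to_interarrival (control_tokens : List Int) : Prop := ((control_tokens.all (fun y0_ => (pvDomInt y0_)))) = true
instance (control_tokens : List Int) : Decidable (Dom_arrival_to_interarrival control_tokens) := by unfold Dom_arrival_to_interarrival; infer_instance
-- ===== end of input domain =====

-- B replaces A's slice-extract / diffs-list / scatter-back pipeline by one reverse in-place
-- index loop (no intermediate lists); both Pythons mutate the argument to the same final
-- contents, and the equivalence proved here is about the return value.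


-- ===== PORT A =====
-- hand port of the extended slice xs[0::3] (step 3 is beyond PySem.List.slice): exact
def take3 : List Int → List Int
  | [] => []
  | x :: rest => x :: take3 (rest.drop 2)
termination_by xs => xs.length
decreasing_by simp

-- hand port of the extended-slice assignment ct[0::3] = ts: exact whenever
-- len(ts) = len(ct[0::3]) (always the case in A; Python raises ValueError otherwise)
def scatter3 : List Int → List Int → List Int
  | [], _ => []
  | x :: r, [] => x :: r
  | _ :: r, t :: ts => t :: (r.take 2 ++ scatter3 (r.drop 2) ts)
termination_by ct _ => ct.length
decreasing_by simp

def arrival_to_interarrival (control_tokens : List Int) : List Int :=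
  let time_tokens := take3 control_tokens
  if 2 ≤ time_tokens.length then
    let firsts := PySem.List.slice time_tokens (some 1) none
    let lasts := PySem.List.slice time_tokens none (some (-1))
    -- for i in range(len(time_tokens) - 1): diffs.append(firsts[i] - lasts[i])
    -- (firsts[i], lasts[i] are always in range here, so pyGetD is exact)
    let diffs := (PySem.List.pyRange 0 ((time_tokens.length : Int) - 1) 1).foldl
        (fun acc i => acc ++ [PySem.List.pyGetD firsts i 0 - PySem.List.pyGetD lasts i 0]) []
    -- time_tokens[1:] = diffs (len(diffs) = len(time_tokens) - 1, so this is exact)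
    scatter3 control_tokens (time_tokens.take 1 ++ diffs)
  else
    scatter3 control_tokens time_tokens

-- ===== PORT B =====
-- while i >= 3: control_tokens[i] -= control_tokens[i-3]; i -= 3
-- (i is always a valid nonnegative index here, so pyGetD/set at i.toNat are exact)
def bLoop (xs : List Int) (i : Int) : List Int :=
  if h : 3 ≤ i then
    bLoop (xs.set i.toNat (PySem.List.pyGetD xs i 0 - PySem.List.pyGetD xs (i - 3) 0)) (i - 3)
  else xs
termination_by i.toNat
decreasing_by omega

def arrival_to_interarrival_alt (control_tokens : List Int) : List Int :=
  if 3 < (control_tokens.length : Int) then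
    bLoop control_tokens (3 * PySem.Int.floordiv ((control_tokens.length : Int) - 1) 3)
  else control_tokens

-- ===== PRECONDITION & SPEC =====
def Spec_arrival_to_interarrival (control_tokens : List Int) (out : List Int) : Prop := out = arrival_to_interarrival_alt control_tokens
instance (control_tokens : List Int) (out : List Int) : Decidable (Spec_arrival_to_interarrival control_tokens out) := by unfold Spec_arrival_to_interarrival; infer_instance

-- ===== CLAIM (what is proved, stated in full; the proofs are below) =====
def Claim_equal_arrival_to_interarrival : Prop := ∀ (control_tokens : List Int), Dom_arrival_to_interarrival control_tokens → Spec_arrival_to_interarrival control_tokens (arrival_to_interarrival control_tokens)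

-- ===== LEMMAS AND PROOFS =====

-- chunk-recursive bridge: what both programs compute
def sp : Int → List Int → List Int
  | prev, b :: c :: d :: rest => b :: c :: (d - prev) :: sp d rest
  | _, tail => tail

def spec0 : List Int → List Int
  | [] => []
  | a :: tail => a :: sp a tail

theorem map_range_diff (f : List Int) : ∀ (l : List Int), f.length ≤ l.length →
    (List.range f.length).map (fun k => f.getD k 0 - l.getD k 0) = List.zipWith (· - ·) f l := by
  induction f with
  | nil => intro l _; simp
  | cons x f' ih =>
    intro l hl
    cases l with
    | nil => simp at hl
    | cons y l' =>
      simp only [List.length_cons, List.range_succ_eq_map, List.map_cons, List.map_map]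
      simp only [List.getD_cons_zero, List.zipWith_cons_cons]
      exact congrArg _ (ih l' (by simpa using hl))

-- diffs = zipWith sub (tt.drop 1) tt   (for nonempty tt)
theorem diffs_eq (tt : List Int) (h : 1 ≤ tt.length) :
    (PySem.List.pyRange 0 ((tt.length : Int) - 1) 1).foldl
        (fun acc i => acc ++ [PySem.List.pyGetD (PySem.List.slice tt (some 1) none) i 0
                              - PySem.List.pyGetD (PySem.List.slice tt none (some (-1))) i 0]) []
    = List.zipWith (· - ·) (tt.drop 1) tt := by
  rw [PySem.List.slice_from tt (by norm_num : (0:Int) ≤ 1), PySem.List.slice_to_neg_one]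
  rw [PySem.List.foldl_append_singleton_eq_map]
  have hc : ((tt.length : Int) - 1) = ((tt.length - 1 : Nat) : Int) := by omega
  rw [hc, PySem.List.pyRange_zero_natCast, List.map_map]
  have h1 : (tt.drop 1).length = tt.length - 1 := by simp
  have this1 := map_range_diff (tt.drop 1) tt.dropLast (by simp)
  rw [h1] at this1
  simp only [Int.toNat_one, Function.comp_def, PySem.List.pyGetD_natCast, List.nil_append]
  rw [this1, List.dropLast_eq_take]
  conv_lhs => rw [← List.take_of_length_le (le_of_eq h1)]
  rw [← List.take_zipWith, List.take_of_length_le (by simp)]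

theorem L2 (rest : List Int) (prev : Int) :
    rest.take 2 ++ scatter3 (rest.drop 2)
      (List.zipWith (· - ·) (take3 (rest.drop 2)) (prev :: take3 (rest.drop 2)))
    = sp prev rest := by
  match rest with
  | [] => simp [take3, scatter3, sp]
  | [b] => simp [take3, scatter3, sp]
  | [b, c] => simp [take3, scatter3, sp]
  | b :: c :: d :: r =>
    show b :: c :: _ = _
    simp only [List.drop, take3, List.zipWith_cons_cons, scatter3, sp]
    rw [L2 r d]
    simp
termination_by rest.length

theorem take3_nil_iff (ys : List Int) : take3 ys = [] ↔ ys = [] := by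
  cases ys <;> simp [take3]

theorem A_eq_spec (xs : List Int) : arrival_to_interarrival xs = spec0 xs := by
  cases xs with
  | nil => simp [arrival_to_interarrival, take3, scatter3, spec0]
  | cons a rest =>
    have htt : take3 (a :: rest) = a :: take3 (rest.drop 2) := by simp [take3]
    unfold arrival_to_interarrival
    simp only [htt]
    by_cases h2 : 2 ≤ (a :: take3 (rest.drop 2)).length
    · rw [if_pos h2, diffs_eq _ (by simp)]
      simp only [List.take_succ_cons, List.take_zero, List.drop_succ_cons, List.drop_zero,
        List.singleton_append]
      simp only [scatter3, spec0]
      rw [L2 rest a]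
    · rw [if_neg h2]
      have hnil : take3 (rest.drop 2) = [] := by
        rcases hx : take3 (rest.drop 2) with _ | ⟨t, ts⟩
        · rfl
        · rw [hx] at h2; simp at h2
      have hdnil : rest.drop 2 = [] := (take3_nil_iff _).1 hnil
      rw [hnil]
      simp only [scatter3, spec0]
      rw [← L2 rest a]
      simp [hdnil, take3, scatter3]

theorem bLoop_length (xs : List Int) (i : Int) : (bLoop xs i).length = xs.length := by
  by_cases h : 3 ≤ i
  · rw [bLoop, dif_pos h, bLoop_length, List.length_set]
  · rw [bLoop, dif_neg h]
termination_by i.toNat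
decreasing_by omega
theorem bLoop_getD (xs : List Int) (i : Int) (h0 : 0 ≤ i) (h3 : (3:Int) ∣ i)
    (hlt : i < (xs.length : Int)) (j : Nat) (hj : j < xs.length) :
    (bLoop xs i).getD j 0 =
      if j % 3 = 0 ∧ 3 ≤ j ∧ (j : Int) ≤ i then xs.getD j 0 - xs.getD (j - 3) 0
      else xs.getD j 0 := by
  by_cases h : 3 ≤ i
  · rw [bLoop, dif_pos h]
    set v := PySem.List.pyGetD xs i 0 - PySem.List.pyGetD xs (i - 3) 0 with hv
    have hvv : v = xs.getD i.toNat 0 - xs.getD (i.toNat - 3) 0 := by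
      rw [hv, PySem.List.pyGetD_of_nonneg _ _ (by omega),
        PySem.List.pyGetD_of_nonneg _ _ (by omega)]
      have : (i - 3).toNat = i.toNat - 3 := by omega
      rw [this]
    have hset : ∀ (k : Nat), k < xs.length →
        (xs.set i.toNat v).getD k 0 = if i.toNat = k then v else xs.getD k 0 := by
      intro k hk
      rw [List.getD_eq_getElem _ _ (by simpa using hk), List.getElem_set]
      split_ifs with hik
      · rfl
      · rw [List.getD_eq_getElem _ _ hk]
    have ih := bLoop_getD (xs.set i.toNat v) (i - 3) (by omega) (by omega)
      (by simpa using by omega : (i - 3) < ((xs.set i.toNat v).length : Int)) j (by simpa using hj)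
    rw [ih]
    by_cases hcj : j % 3 = 0 ∧ 3 ≤ j ∧ (j : Int) ≤ i - 3
    · rw [if_pos hcj, if_pos ⟨hcj.1, hcj.2.1, by omega⟩,
        hset j hj, hset (j - 3) (by omega), if_neg (by omega), if_neg (by omega)]
    · rw [if_neg hcj]
      by_cases hji : j = i.toNat
      · rw [hset j hj, if_pos hji.symm, if_pos (by omega), hvv, hji]
      · rw [hset j hj, if_neg (by omega), if_neg (by omega)]
  · rw [bLoop, dif_neg h, if_neg (by omega)]
termination_by i.toNat
decreasing_by omega
theorem sp_length (prev : Int) (rest : List Int) : (sp prev rest).length = rest.length := by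
  match rest with
  | b :: c :: d :: r => simp [sp, sp_length d r]
  | [] => simp [sp]
  | [b] => simp [sp]
  | [b, c] => simp [sp]
termination_by rest.length
theorem sp_getD (prev : Int) (rest : List Int) : ∀ (j : Nat), j < rest.length →
    (sp prev rest).getD j 0 =
      if j % 3 = 2 then rest.getD j 0 - (if j = 2 then prev else rest.getD (j - 3) 0)
      else rest.getD j 0 := by
  match rest with
  | [] => intro j hj; simp at hj
  | [b] => intro j hj; simp at hj; subst hj; simp [sp]
  | [b, c] => intro j hj; simp at hj; rw [if_neg (by omega)]; simp [sp]
  | b :: c :: d :: r =>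
    intro j hj
    match j with
    | 0 => simp [sp]
    | 1 => simp [sp]
    | 2 => simp [sp]
    | (k + 3) =>
      have ih := sp_getD d r k (by simp at hj; omega)
      show (sp prev (b :: c :: d :: r)).getD (k + 3) 0 = _
      simp only [sp, List.getD_cons_succ]
      rw [ih]
      by_cases hm : k % 3 = 2
      · rw [if_pos hm, if_pos (by omega : (k + 3) % 3 = 2), if_neg (by omega : ¬ k + 3 = 2),
          show k + 3 - 3 = k from by omega]
        by_cases hk2 : k = 2
        · subst hk2; simp
        · rw [if_neg hk2]
          have hg : (b :: c :: d :: r : List Int).getD k 0 = r.getD (k - 3) 0 := by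
            conv_lhs => rw [show k = (k - 3) + 3 from by omega]
            simp
          rw [hg]
      · rw [if_neg hm, if_neg (by omega : ¬ (k + 3) % 3 = 2)]
termination_by rest.length
theorem spec0_length (xs : List Int) : (spec0 xs).length = xs.length := by
  cases xs with
  | nil => rfl
  | cons a tail => simp [spec0, sp_length]

theorem spec0_getD (xs : List Int) (j : Nat) (hj : j < xs.length) :
    (spec0 xs).getD j 0 =
      if j % 3 = 0 ∧ 3 ≤ j then xs.getD j 0 - xs.getD (j - 3) 0 else xs.getD j 0 := by
  cases xs with
  | nil => simp at hj
  | cons a tail =>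
    match j with
    | 0 => simp [spec0]
    | (k + 1) =>
      have ih := sp_getD a tail k (by simp at hj; omega)
      simp only [spec0, List.getD_cons_succ]
      rw [ih]
      by_cases hm : k % 3 = 2
      · rw [if_pos hm, if_pos (by omega : (k + 1) % 3 = 0 ∧ 3 ≤ k + 1)]
        by_cases hk2 : k = 2
        · subst hk2; simp
        · rw [if_neg hk2]
          have : k + 1 - 3 = (k - 3) + 1 := by omega
          rw [this, List.getD_cons_succ]
      · rw [if_neg hm, if_neg (by omega)]
theorem B_eq_spec (xs : List Int) : arrival_to_interarrival_alt xs = spec0 xs := by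
  unfold arrival_to_interarrival_alt
  by_cases h : 3 < (xs.length : Int)
  · rw [if_pos h, PySem.Int.floordiv_eq_ediv_of_pos (by norm_num)]
    have hlen : 4 ≤ xs.length := by exact_mod_cast h
    have hi0nn : (0:Int) ≤ 3 * (((xs.length : Int) - 1) / 3) := by omega
    have hi0lt : 3 * (((xs.length : Int) - 1) / 3) < (xs.length : Int) := by omega
    apply List.ext_getElem (by rw [bLoop_length, spec0_length])
    intro j hj1 hj2
    have hjlen : j < xs.length := by rwa [bLoop_length] at hj1
    have hb := bLoop_getD xs _ hi0nn ⟨_, rfl⟩ hi0lt j hjlen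
    have hs := spec0_getD xs j hjlen
    rw [← List.getD_eq_getElem _ 0 hj1, ← List.getD_eq_getElem _ 0 hj2, hb, hs]
    by_cases hc : j % 3 = 0 ∧ 3 ≤ j
    · rw [if_pos ⟨hc.1, hc.2, by omega⟩, if_pos hc]
    · rw [if_neg (by omega), if_neg hc]
  · rw [if_neg h]
    have hlen : xs.length ≤ 3 := by omega
    match xs, hlen with
    | [], _ => rfl
    | [a], _ => simp [spec0, sp]
    | [a, b], _ => simp [spec0, sp]
    | [a, b, c], _ => simp [spec0, sp]
-- ===== VERDICT (by name: the statement is the Claim_ definition above) =====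
theorem arrival_to_interarrival_spec : Claim_equal_arrival_to_interarrival := by
  intro xs _
  unfold Spec_arrival_to_interarrival
  rw [A_eq_spec, B_eq_spec]
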